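-- pv_equiv track=rewrite | github.com/vegastrike/Vega-Strike-Engine-Source | data/modules/PickleTools.py | stripSlashes
-- ===== SOURCE A (Python) =====
-- def _hexbyte2(c, ord=ord, ord_0=ord('0'), ord_9=ord('9'), ord_a=ord('a')):
-- 	ord_c = ord(c)
-- 	if ( ord_c>=ord_0 and ord_c<=ord_9 ):
-- 		return ord_c - ord_0
-- 	else:
-- 		return 10 + ord_c - ord_a
--
-- def _hexbyte(s, hexbyte2=_hexbyte2):
-- 	return ( hexbyte2(s[0])*16+hexbyte2(s[1]) ) % 256
--
-- def stripSlashes(m, hexbyte=_hexbyte, chr=chr):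
-- 	if '\\' not in m:
-- 		return m
-- 	rv = []
-- 	rva = rv.append
-- 	i = 0
-- 	l = len(m)
-- 	while (i<l):
-- 		if (m[i]=='\\') and (i+2<l):
-- 			rva( chr( hexbyte(m[i+1:i+3]) ) )
-- 			i += 3
-- 		else:
-- 			rva( m[i] )
-- 			i += 1
-- 	return "".join(rv)
-- ===== SOURCE B (Python) =====
-- def _hexbyte2(c, ord=ord, ord_0=ord('0'), ord_9=ord('9'), ord_a=ord('a')):
-- 	ord_c = ord(c)
-- 	if ( ord_c>=ord_0 and ord_c<=ord_9 ):
-- 		return ord_c - ord_0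
-- 	else:
-- 		return 10 + ord_c - ord_a
--
-- def _hexbyte(s, hexbyte2=_hexbyte2):
-- 	return ( hexbyte2(s[0])*16+hexbyte2(s[1]) ) % 256
--
-- def stripSlashes(m, hexbyte=_hexbyte, chr=chr):
-- 	# Jump from backslash to backslash with str.find and copy whole chunks,
-- 	# instead of scanning character by character.
-- 	out = []
-- 	s = m
-- 	while True:
-- 		j = s.find('\\')
-- 		if j == -1 or j + 3 > len(s):
-- 			out.append(s)
-- 			return ''.join(out)
-- 		out.append(s[:j])
-- 		out.append(chr(hexbyte(s[j+1:j+3])))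
-- 		s = s[j+3:]
-- ===== Notes on version B (the rewrite author's own statement) =====
-- stated objective: alternative
-- what changed: B replaces A's per-character index loop by a chunked scan that jumps to each backslash with str.find and copies whole slices between escapes.
import Mathlib
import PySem

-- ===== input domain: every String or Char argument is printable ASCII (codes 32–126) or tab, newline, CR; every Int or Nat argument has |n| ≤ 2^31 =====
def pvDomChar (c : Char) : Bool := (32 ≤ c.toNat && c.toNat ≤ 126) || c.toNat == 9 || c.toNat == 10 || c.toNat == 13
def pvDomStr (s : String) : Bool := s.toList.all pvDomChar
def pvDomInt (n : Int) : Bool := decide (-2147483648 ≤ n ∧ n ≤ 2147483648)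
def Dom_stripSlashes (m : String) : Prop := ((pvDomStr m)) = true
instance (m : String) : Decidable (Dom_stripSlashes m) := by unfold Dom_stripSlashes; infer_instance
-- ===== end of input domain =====

-- B replaces A's per-character index loop by a chunked scan that jumps to each
-- backslash with str.find and copies whole slices between escapes (alternative
-- decomposition, same asymptotic cost).


-- ===== PORT A =====
-- _hexbyte2(c): decode one "hex" character the way A does (non-hex chars get
-- the same nonstandard value A computes).
def pvHexbyte2 (c : Char) : Int :=
  let ord_c : Int := (c.toNat : Int)
  if 48 ≤ ord_c ∧ ord_c ≤ 57 then ord_c - 48 else 10 + ord_c - 97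

-- _hexbyte(s): both callers pass a slice of exactly two characters, so s[0]/s[1]
-- are read with getD (exact for length-2 input, where Python never raises).
def pvHexbyte (s : List Char) : Int :=
  PySem.Int.mod (pvHexbyte2 (s.getD 0 ' ') * 16 + pvHexbyte2 (s.getD 1 ' ')) 256

-- chr(n) for 0 ≤ n < 256 (pvHexbyte's range, by the % 256).
def pvChr (n : Int) : Char := Char.ofNat n.toNat

-- A's while loop: index i over m, rv the accumulated output characters
-- (Python's list of 1-char strings joined by "" = the char list made a String).
-- m[i] is read with getD, exact since the loop guarantees i < l.
def pvLoopA (cs : List Char) (l : Nat) (i : Nat) (rv : List Char) : List Char :=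
  if _h : i < l then
    if cs.getD i ' ' = '\\' ∧ i + 2 < l then
      pvLoopA cs l (i + 3) (rv ++ [pvChr (pvHexbyte ((cs.drop (i+1)).take 2))])
    else
      pvLoopA cs l (i + 1) (rv ++ [cs.getD i ' '])
  else rv
termination_by l - i
decreasing_by all_goals omega

def stripSlashes (m : String) : String :=
  if PySem.Str.isIn "\\" m = false then m
  else String.ofList (pvLoopA m.toList m.toList.length 0 [])

-- ===== PORT B =====
-- B's while loop on the remaining suffix s: find the next backslash, copy the
-- chunk before it, decode, continue after the escape.  s[:j], s[j+1:j+3] and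
-- s[j+3:] are take/drop since 0 ≤ j (PySem.List.slice_natCast).
def pvLoopB (s : List Char) (out : List Char) : List Char :=
  let j := PySem.Chars.find s ['\\']
  if _h : j = -1 ∨ j + 3 > (s.length : Int) then out ++ s
  else
    pvLoopB (s.drop (j.toNat + 3))
      (out ++ s.take j.toNat ++ [pvChr (pvHexbyte ((s.drop (j.toNat + 1)).take 2))])
termination_by s.length
decreasing_by
  have h0 : (0:Int) ≤ j := by
    have := PySem.Chars.neg_one_le_find s ['\\']
    omega
  simp [List.length_drop]
  omega

def stripSlashes_alt (m : String) : String :=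
  String.ofList (pvLoopB m.toList [])

-- ===== PRECONDITION & SPEC =====
def Spec_stripSlashes (m : String) (out : String) : Prop := out = stripSlashes_alt m
instance (m : String) (out : String) : Decidable (Spec_stripSlashes m out) := by unfold Spec_stripSlashes; infer_instance

-- ===== CLAIM (what is proved, stated in full; the proofs are below) =====
def Claim_equal_stripSlashes : Prop := ∀ (m : String), Dom_stripSlashes m → Spec_stripSlashes m (stripSlashes m)

-- ===== LEMMAS AND PROOFS =====

-- Reference decode: what both loops compute, defined structurally.
def pvDec : List Char → List Char
  | [] => []
  | c :: rest =>
    if c = '\\' ∧ 2 ≤ rest.length then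
      pvChr (pvHexbyte (rest.take 2)) :: pvDec (rest.drop 2)
    else c :: pvDec rest
termination_by s => s.length
decreasing_by all_goals (simp only [List.length_drop, List.length_cons]; omega)

theorem pvDec_no_slash (s : List Char) (h : '\\' ∉ s) : pvDec s = s := by
  induction s with
  | nil => simp [pvDec]
  | cons c rest ih =>
    simp only [List.mem_cons, not_or] at h
    have hc : ¬ (c = '\\' ∧ 2 ≤ rest.length) := fun hx => h.1 hx.1.symm
    rw [pvDec]
    simp only [hc, if_false]
    rw [ih h.2]


-- head of the suffix starting at i, read as Python's m[i]
theorem pvGetD_of_drop (s : List Char) (i : Nat) (c : Char) (t : List Char)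
    (h : s.drop i = c :: t) : s.getD i ' ' = c := by
  have hi : i < s.length := by
    by_contra hge
    rw [List.drop_eq_nil_of_le (by omega)] at h
    simp at h
  have h0 : (s.drop i)[0]'(by rw [h]; simp) = c := by simp [h]
  rw [List.getElem_drop] at h0
  rw [List.getD_eq_getElem _ _ (by omega)]
  simpa using h0

-- If every backslash in s has fewer than 2 characters after it, pvDec s = s.
theorem pvDec_tail (s : List Char)
    (h : ∀ p, p < s.length → s.getD p ' ' = '\\' → s.length ≤ p + 2) : pvDec s = s := by
  induction s with
  | nil => simp [pvDec]
  | cons c rest ih =>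
    rw [pvDec]
    by_cases hc : c = '\\' ∧ 2 ≤ rest.length
    · exfalso
      have h0 := h 0 (by simp) (by simpa using hc.1)
      simp only [List.length_cons] at h0
      omega
    · simp only [hc, if_false]
      congr 1
      apply ih
      intro p hp hcp
      have := h (p+1) (by simpa using Nat.succ_lt_succ hp) (by simpa using hcp)
      simpa using this

theorem pvDec_append_clean (u v : List Char) (h : '\\' ∉ u) :
    pvDec (u ++ v) = u ++ pvDec v := by
  induction u with
  | nil => simp
  | cons c rest ih =>
    simp only [List.mem_cons, not_or] at h
    have hc : ¬ (c = '\\' ∧ 2 ≤ (rest ++ v).length) := fun hx => h.1 hx.1.symm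
    rw [List.cons_append, pvDec]
    simp only [hc, if_false]
    rw [ih h.2]
    simp

-- A's loop from index i appends pvDec of the remaining suffix.
theorem pvLoopA_eq (cs : List Char) (i : Nat) (rv : List Char) :
    pvLoopA cs cs.length i rv = rv ++ pvDec (cs.drop i) := by
  rw [pvLoopA]
  by_cases h : i < cs.length
  · have hne : cs.drop i ≠ [] := by
      intro hnil
      have := List.length_drop (l := cs) (i := i)
      rw [hnil] at this; simp at this; omega
    obtain ⟨c, t, hct⟩ := List.exists_cons_of_ne_nil hne
    have hgi : cs.getD i ' ' = c := pvGetD_of_drop cs i c t hct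
    have htl : t = cs.drop (i+1) := by
      have : (cs.drop i).tail = cs.drop (i+1) := by
        rw [List.tail_drop]
      simpa [hct] using this
    have htlen : t.length = cs.length - (i+1) := by
      rw [htl]; simp
    by_cases hb : cs.getD i ' ' = '\\' ∧ i + 2 < cs.length
    · simp only [h, hb, dif_pos]
      rw [pvLoopA_eq cs (i+3) _]
      rw [hct, pvDec]
      have : c = '\\' ∧ 2 ≤ t.length := by
        constructor
        · rw [← hgi]; exact hb.1
        · omega
      simp only [this, and_self, if_true]
      have h1 : t.take 2 = (cs.drop (i+1)).take 2 := by rw [htl]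
      have h2 : t.drop 2 = cs.drop (i+3) := by
        rw [htl, List.drop_drop]
      rw [h1, h2]
      simp
    · simp only [h, dif_pos, hb, if_false]
      rw [pvLoopA_eq cs (i+1) _]
      rw [hct, pvDec]
      have hcond : ¬ (c = '\\' ∧ 2 ≤ t.length) := by
        intro ⟨h1, h2⟩
        exact hb ⟨by rw [hgi, h1], by omega⟩
      simp only [hcond, if_false]
      rw [hgi, ← htl]
      simp
  · have : cs.length ≤ i := by omega
    simp [h, List.drop_eq_nil_of_le this, pvDec]
termination_by cs.length - i
decreasing_by all_goals omega

-- characterisation of find for the single-character pattern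
theorem find_slash_spec (s : List Char) (j : Int)
    (hj : PySem.Chars.find s ['\\'] = j) (hne : j ≠ -1) :
    0 ≤ j ∧ j.toNat < s.length ∧ s.getD j.toNat ' ' = '\\' ∧
      ∀ p, p < j.toNat → s.getD p ' ' ≠ '\\' := by
  have hge : 0 ≤ j := by
    rw [← hj]
    rw [PySem.Chars.find_nonneg_iff]
    rw [← PySem.Chars.find_ne_neg_one_iff]
    omega
  have hspec := PySem.Chars.find_spec (s := s) (sub := ['\\']) (by omega)
  rw [hj] at hspec
  obtain ⟨hpre, hmin⟩ := hspec
  have hdne : s.drop j.toNat ≠ [] := by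
    intro hnil
    rw [hnil] at hpre
    exact (by simpa using List.IsPrefix.length_le hpre)
  have hlt : j.toNat < s.length := by
    by_contra hge'
    exact hdne (List.drop_eq_nil_of_le (by omega))
  refine ⟨hge, hlt, ?_, ?_⟩
  · obtain ⟨t, ht⟩ := hpre
    exact pvGetD_of_drop s j.toNat '\\' t (by rw [← ht]; simp)
  · intro p hp hpc
    apply hmin p hp
    have hpl : p < s.length := by omega
    have hne2 : s.drop p ≠ [] := by
      intro hnil
      have := List.length_drop (l := s) (i := p)
      rw [hnil] at this; simp at this; omega
    obtain ⟨c, t, hct⟩ := List.exists_cons_of_ne_nil hne2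
    have hc : c = '\\' := by
      have := pvGetD_of_drop s p c t hct
      rw [hpc] at this; exact this.symm
    exact ⟨t, by rw [hct, hc]; rfl⟩

theorem pvLoopB_eq (s : List Char) (out : List Char) :
    pvLoopB s out = out ++ pvDec s := by
  rw [pvLoopB]
  set j := PySem.Chars.find s ['\\'] with hj
  by_cases h : j = -1 ∨ j + 3 > (s.length : Int)
  · simp only [h, dif_pos]
    congr 1
    by_cases h1 : j = -1
    · rw [pvDec_no_slash]
      intro hmem
      obtain ⟨l1, l2, hl⟩ := List.mem_iff_append.mp hmem
      have hinf : ['\\'] <:+: s := ⟨l1, l2, by rw [hl]; simp⟩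
      rw [← PySem.Chars.find_ne_neg_one_iff] at hinf
      rw [hj] at h1
      exact hinf h1
    · have h3 : (s.length : Int) < j + 3 := by omega
      obtain ⟨hge, hlt, hat, hmin⟩ := find_slash_spec s j hj.symm h1
      rw [pvDec_tail]
      intro p hp hpc
      by_cases hpj : p < j.toNat
      · exact absurd hpc (hmin p hpj)
      · omega
  · simp only [h, dif_neg, not_false_iff]
    have h1 : j ≠ -1 := by
      intro h1; exact h (Or.inl h1)
    obtain ⟨hge, hlt, hat, hmin⟩ := find_slash_spec s j hj.symm h1
    have hlen3 : j.toNat + 3 ≤ s.length := by omega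
    rw [pvLoopB_eq]
    have hsplit : s = s.take j.toNat ++ s.drop j.toNat := by simp
    have hclean : '\\' ∉ s.take j.toNat := by
      intro hmem
      obtain ⟨p, hp, hpe⟩ := List.getElem_of_mem hmem
      have hplen : p < j.toNat := by
        have := List.length_take_le j.toNat s
        omega
      apply hmin p hplen
      have : (s.take j.toNat)[p] = s[p]'(by omega) := List.getElem_take
      rw [this] at hpe
      rw [List.getD_eq_getElem _ _ (by omega)]
      exact hpe
    have hne2 : s.drop j.toNat ≠ [] := by
      intro hnil
      have := List.length_drop (l := s) (i := j.toNat)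
      rw [hnil] at this; simp at this; omega
    obtain ⟨c, t, hct⟩ := List.exists_cons_of_ne_nil hne2
    have hc : c = '\\' := by
      have := pvGetD_of_drop s j.toNat c t hct
      rw [hat] at this; exact this.symm
    have htl : t = s.drop (j.toNat + 1) := by
      have : (s.drop j.toNat).tail = s.drop (j.toNat + 1) := List.tail_drop ..
      simpa [hct] using this
    have htlen : 2 ≤ t.length := by
      rw [htl]; simp; omega
    conv_rhs => rw [hsplit]
    rw [pvDec_append_clean _ _ hclean, hct, hc, pvDec]
    simp only [htlen, and_true, if_pos]
    have h4 : t.take 2 = (s.drop (j.toNat + 1)).take 2 := by rw [htl]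
    have h5 : t.drop 2 = s.drop (j.toNat + 3) := by
      rw [htl, List.drop_drop]
    rw [h4, h5]
    simp
termination_by s.length
decreasing_by
  simp [List.length_drop]
  omega

-- ===== VERDICT (by name: the statement is the Claim_ definition above) =====
theorem stripSlashes_spec : Claim_equal_stripSlashes := by
  intro m _
  unfold Spec_stripSlashes stripSlashes stripSlashes_alt
  rw [pvLoopB_eq]
  simp only [List.nil_append]
  split_ifs with hin
  · have hin' : ¬ (['\\'] <:+: m.toList) := by
      rw [← PySem.Chars.isIn_eq_false_iff]
      simpa using hin
    have hns : '\\' ∉ m.toList := by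
      intro hmem
      obtain ⟨l1, l2, hl⟩ := List.mem_iff_append.mp hmem
      exact hin' ⟨l1, l2, by rw [hl]; simp⟩
    rw [pvDec_no_slash _ hns]
    exact (String.ofList_toList).symm
  · rw [pvLoopA_eq]
    simp
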